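-- pv_equiv track=rewrite | github.com/skush2024/Data-Structures | Arrays/lc_485.py | solve
-- ===== SOURCE A (Python) =====
-- def solve(nums):
--     maxi = 0
--     sum_temp = 0
--
--     for i in range(len(nums)):
--         sum_temp += nums[i]
--         if nums[i] == 0 :
--             maxi = max(maxi, sum_temp)
--             sum_temp = 0
--
--     return (max(maxi, sum_temp))
-- ===== SOURCE B (Python) =====
-- def solve(nums):
--     # two-phase: split into maximal zero-separated segments, then max of segment sums (floored at 0)
--     segments = []
--     cur = []
--     for x in nums:
--         if x == 0:
--             segments.append(cur)
--             cur = []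
--         else:
--             cur.append(x)
--     segments.append(cur)
--     return max([0] + [sum(seg) for seg in segments])
-- ===== Notes on version B (the rewrite author's own statement) =====
-- stated objective: alternative
-- what changed: Replaces the inline running accumulator with reset-at-zero by a two-phase computation: split nums into zero-separated segments, then take the max of their sums floored at 0.
import Mathlib
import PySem

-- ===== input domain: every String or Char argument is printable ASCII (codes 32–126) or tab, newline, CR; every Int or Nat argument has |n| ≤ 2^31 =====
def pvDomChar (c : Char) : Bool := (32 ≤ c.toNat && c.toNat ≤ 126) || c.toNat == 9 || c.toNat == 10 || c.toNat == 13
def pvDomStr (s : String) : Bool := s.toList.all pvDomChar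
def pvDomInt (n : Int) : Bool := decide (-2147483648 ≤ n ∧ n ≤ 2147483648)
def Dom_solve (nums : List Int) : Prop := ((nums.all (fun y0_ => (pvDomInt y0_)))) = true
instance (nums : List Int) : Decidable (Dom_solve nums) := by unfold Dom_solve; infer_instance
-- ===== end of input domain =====

-- B is a structurally different two-phase computation (split into segments, then max of sums); same value as A everywhere.

-- ===== PORT A =====
-- A's for-loop over indices with state (maxi, sum_temp), as structural recursion over the list
def solveGo (nums : List Int) (maxi sum_temp : Int) : Int :=
  match nums with
  | [] => max maxi sum_temp
  | x :: t =>
    let s := sum_temp + x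
    if x = 0 then solveGo t (max maxi s) 0 else solveGo t maxi s

def solve (nums : List Int) : Int := solveGo nums 0 0

-- ===== PORT B =====
-- phase 1 of Source B: build the list of zero-separated segments (cur appended at each zero and once at the end)
def segsGo (nums : List Int) (cur : List Int) : List (List Int) :=
  match nums with
  | [] => [cur]
  | x :: t => if x = 0 then cur :: segsGo t [] else segsGo t (cur ++ [x])

-- phase 2 of Source B: max([0] + [sum(seg) for seg in segments]) (Python max is a left fold)
def solve_alt (nums : List Int) : Int :=
  ((segsGo nums []).map List.sum).foldl max 0

-- ===== PRECONDITION & SPEC =====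
def Spec_solve (nums : List Int) (out : Int) : Prop := out = solve_alt nums
instance (nums : List Int) (out : Int) : Decidable (Spec_solve nums out) := by unfold Spec_solve; infer_instance

-- ===== CLAIM (what is proved, stated in full; the proofs are below) =====
def Claim_equal_solve : Prop := ∀ (nums : List Int), Dom_solve nums → Spec_solve nums (solve nums)

-- ===== LEMMAS AND PROOFS =====
theorem solveGo_eq_segs (nums : List Int) :
    ∀ (cur : List Int) (maxi : Int),
      solveGo nums maxi cur.sum = ((segsGo nums cur).map List.sum).foldl max maxi := by
  induction nums with
  | nil => intro cur maxi; simp [solveGo, segsGo]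
  | cons x t ih =>
    intro cur maxi
    by_cases hx : x = 0
    · subst hx
      simpa [solveGo, segsGo] using ih [] (max maxi cur.sum)
    · have h : cur.sum + x = (cur ++ [x]).sum := by simp
      simp only [solveGo, segsGo, if_neg hx, h]
      exact ih (cur ++ [x]) maxi

-- ===== VERDICT (by name: the statement is the Claim_ definition above) =====
theorem solve_spec : Claim_equal_solve := by
  intro nums _
  unfold Spec_solve solve solve_alt
  simpa using solveGo_eq_segs nums [] 0
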